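-- pv_equiv track=rewrite | github.com/davidwgeraghty/AdventOfCode | 2023/solutions/day12.py | get_all_possible_arrangements_for_record
-- ===== SOURCE A (Python) =====
-- import itertools
-- from enum import Enum
--
-- class SpringState(Enum):
--     WORKING = "."
--     DAMAGED = "#"
--     UNKNOWN = "?"
--
-- def get_possible_substitutions(unknown_count, spring_states):
--     possible_substitutions = []
--     # use itertools.product to get all possible combinations of [0,1] for the substitutions needed
--     # then map them to the spring states
--     # TODO should really factor in the fact that we can't go over the sum of the tallies
--     for possible_substitution_numbers in itertools.product(range(0, 2), repeat=unknown_count):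
--         sub = []
--         for number in possible_substitution_numbers:
--             sub.append(spring_states[number])
--         possible_substitutions.append(sub)
--     return possible_substitutions
--
-- def get_all_possible_arrangements_for_record(symbols):
--     # get unknown count to see how many substitutions we need to make
--     unknown_count = symbols.count(SpringState.UNKNOWN.value)
--     # get every possible combination of broken and unbroken springs for that number
--     spring_states = [SpringState.WORKING.value, SpringState.DAMAGED.value]
--
--     possible_substitutions = get_possible_substitutions(unknown_count, spring_states)
--     possible_configurations = []
--     for possible_substitution in possible_substitutions:
--         configuration = ""
--         j = 0
--         for i in range(len(symbols)):
--             if symbols[i] == SpringState.UNKNOWN.value: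
--                 configuration += possible_substitution[j]
--                 j += 1
--             else:
--                 configuration += symbols[i]
--         possible_configurations.append(configuration)
--
--     return possible_configurations
-- ===== SOURCE B (Python) =====
-- def get_all_possible_arrangements_for_record(symbols):
--     # single left-to-right pass: maintain the list of partial configurations,
--     # doubling it ('.' before '#') at each unknown spring
--     prefixes = [""]
--     for ch in symbols:
--         if ch == "?":
--             prefixes = [p + c for p in prefixes for c in ".#"]
--         else:
--             prefixes = [p + ch for p in prefixes]
--     return prefixes
-- ===== Notes on version B (the rewrite author's own statement) =====
-- stated objective: simpler
-- what changed: Instead of A's two phases (enumerate all 0/1 tuples with itertools.product, then for each tuple rescan the whole string mapping tuple entries into the '?' positions), B makes a single left-to-right pass over the string maintaining the list of partial configurations, doubling it in place ('.' before '#') at each '?', which reproduces itertools.product's output order.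
import Mathlib
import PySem

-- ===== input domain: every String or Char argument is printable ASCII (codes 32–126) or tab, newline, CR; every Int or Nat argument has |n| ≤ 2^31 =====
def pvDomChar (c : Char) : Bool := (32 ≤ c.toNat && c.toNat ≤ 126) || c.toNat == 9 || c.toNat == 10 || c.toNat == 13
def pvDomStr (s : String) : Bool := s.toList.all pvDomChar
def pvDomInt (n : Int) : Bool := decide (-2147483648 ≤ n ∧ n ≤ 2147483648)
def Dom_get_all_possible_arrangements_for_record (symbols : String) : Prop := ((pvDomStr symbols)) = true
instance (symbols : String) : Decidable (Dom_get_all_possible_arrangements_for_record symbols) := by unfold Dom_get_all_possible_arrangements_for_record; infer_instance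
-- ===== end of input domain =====

-- B replaces A's two-phase itertools.product enumeration plus index-mapped substitution by a
-- single left-to-right pass doubling a list of partial configurations at each '?' ('.' before '#');
-- objective: simpler, same output order.


-- ===== PORT A =====
-- itertools.product(range(0,2), repeat=n): all n-tuples over {0,1} in product (lexicographic) order
def pyProduct01 : Nat → List (List Nat)
  | 0 => [[]]
  | n + 1 => ([0, 1] : List Nat).flatMap (fun x => (pyProduct01 n).map (fun t => x :: t))

def get_possible_substitutions (unknown_count : Nat) (spring_states : List String) : List (List String) :=
  (pyProduct01 unknown_count).foldl
    (fun possible_substitutions possible_substitution_numbers =>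
      possible_substitutions ++
        [possible_substitution_numbers.foldl
          (fun sub number => sub ++ [spring_states.getD number ""]) []])
    []

def get_all_possible_arrangements_for_record (symbols : String) : List String :=
  let unknown_count := PySem.Str.count symbols "?"
  let spring_states : List String := [".", "#"]
  let possible_substitutions := get_possible_substitutions unknown_count spring_states
  possible_substitutions.foldl
    (fun possible_configurations possible_substitution =>
      possible_configurations ++
        [(symbols.toList.foldl
            (fun (st : String × Nat) c =>
              if c = '?' then (st.1 ++ possible_substitution.getD st.2 "", st.2 + 1)
              else (st.1 ++ String.singleton c, st.2))
            ("", 0)).1])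
    []

-- ===== PORT B =====
def get_all_possible_arrangements_for_record_alt (symbols : String) : List String :=
  symbols.toList.foldl
    (fun prefixes ch =>
      if ch = '?' then prefixes.flatMap (fun p => (['.', '#'] : List Char).map (fun c => p.push c))
      else prefixes.map (fun p => p.push ch))
    [""]

-- ===== PRECONDITION & SPEC =====
def Spec_get_all_possible_arrangements_for_record (symbols : String) (out : List String) : Prop := out = get_all_possible_arrangements_for_record_alt symbols
instance (symbols : String) (out : List String) : Decidable (Spec_get_all_possible_arrangements_for_record symbols out) := by unfold Spec_get_all_possible_arrangements_for_record; infer_instance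

-- ===== CLAIM (what is proved, stated in full; the proofs are below) =====
def Claim_equal_get_all_possible_arrangements_for_record : Prop := ∀ (symbols : String), Dom_get_all_possible_arrangements_for_record symbols → Spec_get_all_possible_arrangements_for_record symbols (get_all_possible_arrangements_for_record symbols)

-- ===== LEMMAS AND PROOFS =====

-- all completions of a symbol list, as char lists, in the order both programs produce
def pvComps : List Char → List (List Char)
  | [] => [[]]
  | c :: r =>
    if c = '?' then (pvComps r).map ('.' :: ·) ++ (pvComps r).map ('#' :: ·)
    else (pvComps r).map (c :: ·)

-- A's inner fill loop, recursively: consume a substitution at each '?'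
def pvFill : List Char → List String → String
  | [], _ => ""
  | c :: r, subs =>
    if c = '?' then subs.headD "" ++ pvFill r subs.tail
    else String.singleton c ++ pvFill r subs

theorem pv_count_go (c : Char) (fuel : Nat) (s : List Char) (acc : Nat)
    (h : s.length ≤ fuel) :
    PySem.Chars.count.go [c] fuel s acc = acc + s.count c := by
  induction fuel generalizing s acc with
  | zero =>
    cases s with
    | nil => simp [PySem.Chars.count.go]
    | cons a t => simp at h
  | succ n ih =>
    cases s with
    | nil => simp [PySem.Chars.count.go]
    | cons a t =>
      simp only [List.length_cons, Nat.add_le_add_iff_right] at h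
      by_cases hac : a = c
      · subst hac
        have hp : ([a] : List Char).isPrefixOf (a :: t) = true := by
          simp [List.isPrefixOf]
        simp only [PySem.Chars.count.go, hp, if_true, List.length_nil, List.drop_zero,
          List.length_cons, List.drop_succ_cons]
        rw [ih t (acc + 1) h]
        simp
        omega
      · have hp : ([c] : List Char).isPrefixOf (a :: t) = false := by
          simp [List.isPrefixOf]; exact fun h' => absurd h'.symm hac
        simp only [PySem.Chars.count.go, hp, Bool.false_eq_true, if_false]
        rw [ih t acc h]
        have hb : (a == c) = false := by simp [hac]
        simp [List.count_cons, hb]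

theorem pv_str_count (s : String) : PySem.Str.count s "?" = s.toList.count '?' := by
  have h : ("?" : String).toList = ['?'] := by decide
  simp only [PySem.Str.count, PySem.Chars.count, h, List.isEmpty_cons, Bool.false_eq_true,
    if_false]
  exact (pv_count_go '?' _ _ 0 le_rfl).trans (by simp)

theorem pv_ofList_cons (c : Char) (t : List Char) :
    String.ofList (c :: t) = String.singleton c ++ String.ofList t := by
  apply String.toList_inj.mp; simp

theorem pv_push_append (p : String) (c : Char) (t : List Char) :
    p.push c ++ String.ofList t = p ++ String.ofList (c :: t) := by
  apply String.toList_inj.mp; simp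

-- a loop appending one element per iteration is a map
theorem pv_foldl_append {α β : Type} (l : List α) (f : α → β) (acc : List β) :
    l.foldl (fun acc x => acc ++ [f x]) acc = acc ++ l.map f := by
  induction l generalizing acc with
  | nil => simp
  | cons a t ih => simp [ih]

-- A's fill foldl computes pvFill, from any start accumulator
theorem pv_fill_foldl (cs : List Char) (sub : List String) (pre : String) (j : Nat) :
    cs.foldl
      (fun (st : String × Nat) c =>
        if c = '?' then (st.1 ++ sub.getD st.2 "", st.2 + 1)
        else (st.1 ++ String.singleton c, st.2))
      (pre, j)
    = (pre ++ pvFill cs (sub.drop j), j + cs.count '?') := by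
  induction cs generalizing pre j with
  | nil => simp [pvFill]
  | cons c r ih =>
    by_cases hc : c = '?'
    · subst hc
      have hget : sub.getD j "" = (sub.drop j).headD "" := by
        simp [List.getD_eq_getElem?_getD, List.head?_drop]
      have htail : sub.drop (j + 1) = (sub.drop j).tail := by
        simp [List.tail_drop]
      simp only [List.foldl_cons, reduceIte, ih, pvFill, hget, htail,
        String.append_assoc, List.count_cons, Prod.mk.injEq]
      exact ⟨trivial, by simp; omega⟩
    · simp only [List.foldl_cons, if_neg hc, ih, pvFill, String.append_assoc,
        List.count_cons, Prod.mk.injEq]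
      have hb : (c == '?') = false := by simp [hc]
      exact ⟨trivial, by simp [hb]⟩

-- the product-then-fill phase of A produces exactly the completions, in order
theorem pv_A_comps (cs : List Char) :
    (pyProduct01 (cs.count '?')).map
      (fun nums => pvFill cs (nums.map (fun n => ([".", "#"] : List String).getD n "")))
    = (pvComps cs).map String.ofList := by
  induction cs with
  | nil => simp [pyProduct01, pvFill, pvComps]
  | cons c r ih =>
    by_cases hc : c = '?'
    · subst hc
      have hcnt : (('?' : Char) :: r).count '?' = r.count '?' + 1 := by simp
      rw [hcnt]
      simp only [pyProduct01, List.flatMap_cons, List.flatMap_nil, List.append_nil,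
        List.map_append, List.map_map, pvComps, reduceIte]
      have half : ∀ (x : Char) (xn : Nat),
          ((([".", "#"] : List String)[xn]?).getD "" = String.singleton x) →
          List.map ((fun nums => pvFill ('?' :: r)
              (nums.map (fun n => ([".", "#"] : List String).getD n ""))) ∘ (fun t => xn :: t))
            (pyProduct01 (r.count '?'))
          = List.map (String.ofList ∘ (fun t => x :: t)) (pvComps r) := by
        intro x xn hx
        have hstep : ∀ nums, ((fun (nums : List Nat) => pvFill ('?' :: r)
              (nums.map (fun n => ([".", "#"] : List String).getD n ""))) ∘ (fun t => xn :: t)) nums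
            = ((String.singleton x ++ ·) ∘
               fun nums => pvFill r (nums.map (fun n => ([".", "#"] : List String).getD n ""))) nums := by
          intro nums; simp [Function.comp, pvFill, List.getD, hx]
        rw [List.map_congr_left (fun a _ => hstep a), ← List.map_map, ih, List.map_map]
        exact List.map_congr_left (fun t _ => by simp [Function.comp, pv_ofList_cons])
      rw [half '.' 0 (by decide), half '#' 1 (by decide)]
    · have hcnt : (c :: r).count '?' = r.count '?' := by simp [hc]
      rw [hcnt]
      simp only [pvComps, if_neg hc, List.map_map]
      have hstep : ∀ nums, (fun (nums : List Nat) => pvFill (c :: r)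
            (nums.map (fun n => ([".", "#"] : List String).getD n ""))) nums
          = ((String.singleton c ++ ·) ∘
             fun nums => pvFill r (nums.map (fun n => ([".", "#"] : List String).getD n ""))) nums := by
        intro nums; simp [Function.comp, pvFill, hc]
      rw [List.map_congr_left (fun a _ => hstep a), ← List.map_map, ih, List.map_map]
      exact List.map_congr_left (fun t _ => by simp [Function.comp, pv_ofList_cons])

-- B's pass, from any list of partial prefixes
theorem pv_B_foldl (cs : List Char) (prefixes : List String) :
    cs.foldl
      (fun prefixes ch =>
        if ch = '?' then prefixes.flatMap (fun p => (['.', '#'] : List Char).map (fun c => p.push c))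
        else prefixes.map (fun p => p.push ch))
      prefixes
    = prefixes.flatMap (fun p => (pvComps cs).map (fun t => p ++ String.ofList t)) := by
  induction cs generalizing prefixes with
  | nil => simp [pvComps, String.append_empty]
  | cons c r ih =>
    by_cases hc : c = '?'
    · subst hc
      simp only [List.foldl_cons, reduceIte, ih, pvComps]
      rw [List.flatMap_assoc]
      apply List.flatMap_congr
      intro p _
      simp only [List.map_cons, List.map_nil, List.flatMap_cons, List.flatMap_nil,
        List.append_nil, List.map_append, List.map_map]
      simp [pv_push_append, Function.comp_def]
    · simp only [List.foldl_cons, if_neg hc, ih, pvComps]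
      rw [List.flatMap_map]
      apply List.flatMap_congr
      intro p _
      simp [Function.comp, List.map_map, pv_push_append]

-- ===== VERDICT (by name: the statement is the Claim_ definition above) =====
theorem get_all_possible_arrangements_for_record_spec : Claim_equal_get_all_possible_arrangements_for_record := by
  intro symbols _
  unfold Spec_get_all_possible_arrangements_for_record
  unfold get_all_possible_arrangements_for_record get_all_possible_arrangements_for_record_alt
    get_possible_substitutions
  simp only [pv_foldl_append, List.nil_append, List.map_map, pv_fill_foldl, List.drop_zero,
    String.empty_append, pv_str_count, pv_B_foldl]
  have hA := pv_A_comps symbols.toList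
  simp only [Function.comp_def] at hA ⊢
  rw [hA]
  simp [String.empty_append]
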